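-- pv_equiv track=rewrite | github.com/NasLabBgu/STEM | stance_classification/data/text_processing.py | fix_numbers
-- ===== SOURCE A (Python) =====
-- def fix_numbers(token: str) -> str:
--     # check if starts with a number
--     new_token = []
--     digits_scope = False
--     for i, c in enumerate(token):
--         if c.isdigit():
--             digits_scope = True
--             continue
--
--         if digits_scope:
--             new_token.append("<NUMBER>")
--             digits_scope = False
--
--         new_token.append(c)
--
--     if digits_scope:
--         new_token.append("<NUMBER>")
--
--     return "".join(new_token)
-- ===== SOURCE B (Python) =====
-- def fix_numbers(token: str) -> str:
--     # stage 1: map every character to its piece ('<NUMBER>' for a digit, itself otherwise)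
--     mapped = ["<NUMBER>" if c.isdigit() else c for c in token]
--     # stage 2: join the pieces, dropping a '<NUMBER>' whose predecessor piece is also '<NUMBER>'
--     return "".join(
--         cur
--         for prev, cur in zip([None] + mapped, mapped)
--         if not (cur == "<NUMBER>" and prev == "<NUMBER>")
--     )
-- ===== Notes on version B (the rewrite author's own statement) =====
-- stated objective: alternative
-- what changed: Replaces A's single stateful flag loop with two stateless staged passes: first map every character to its piece ('<NUMBER>' for a digit, itself otherwise), then join the pieces while dropping a '<NUMBER>' piece whose zipped predecessor piece is also '<NUMBER>'.
import Mathlib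
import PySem

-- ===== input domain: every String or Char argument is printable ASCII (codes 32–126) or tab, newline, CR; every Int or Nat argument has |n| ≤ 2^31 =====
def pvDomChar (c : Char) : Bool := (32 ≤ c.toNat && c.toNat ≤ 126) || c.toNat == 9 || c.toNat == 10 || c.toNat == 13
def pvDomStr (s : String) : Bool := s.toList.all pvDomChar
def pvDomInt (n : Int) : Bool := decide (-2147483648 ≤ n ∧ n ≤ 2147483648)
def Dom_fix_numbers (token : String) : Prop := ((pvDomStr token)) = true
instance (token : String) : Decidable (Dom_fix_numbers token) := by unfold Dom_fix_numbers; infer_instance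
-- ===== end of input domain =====

-- B replaces A's stateful flag loop with two stateless staged passes (map, then zip-with-predecessor filter); alternative decomposition, same cost.

-- ===== PORT A =====
-- A's loop body: state is (new_token, digits_scope); the enumerate index i is unused.
def fixLoop (st : List (List Char) × Bool) (c : Char) : List (List Char) × Bool :=
  if PySem.Chars.isdigit c then (st.1, true)
  else ((if st.2 then st.1 ++ ["<NUMBER>".toList] else st.1) ++ [[c]], false)

def fix_numbers (token : String) : String :=
  let st := token.toList.foldl fixLoop ([], false)
  String.ofList (if st.2 then st.1 ++ ["<NUMBER>".toList] else st.1).flatten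

-- ===== PORT B =====
-- stage 1 of Source B: the per-character piece list
def fnMapped (cs : List Char) : List (List Char) :=
  cs.map (fun c => if PySem.Chars.isdigit c then "<NUMBER>".toList else [c])

-- stage 2 of Source B: zip each piece with its predecessor (none for the first), keep cur
-- unless cur and prev are both the placeholder, and join.
def fix_numbers_alt (token : String) : String :=
  let mapped := fnMapped token.toList
  String.ofList (((List.zip ((none : Option (List Char)) :: mapped.map some) mapped).filterMap
    (fun pc => if pc.2 = "<NUMBER>".toList ∧ pc.1 = some ("<NUMBER>".toList)
               then none else some pc.2)).flatten)

-- ===== PRECONDITION & SPEC =====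
def Spec_fix_numbers (token : String) (out : String) : Prop := out = fix_numbers_alt token
instance (token : String) (out : String) : Decidable (Spec_fix_numbers token out) := by unfold Spec_fix_numbers; infer_instance

-- ===== CLAIM (what is proved, stated in full; the proofs are below) =====
def Claim_equal_fix_numbers : Prop := ∀ (token : String), Dom_fix_numbers token → Spec_fix_numbers token (fix_numbers token)

-- ===== LEMMAS AND PROOFS =====

-- middle form of A: what A emits from the remaining chars given the pending digits_scope flag
def gmid : List Char → Bool → List Char
  | [], flag => if flag then "<NUMBER>".toList else []
  | c :: cs, flag =>
    if PySem.Chars.isdigit c then gmid cs true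
    else (if flag then "<NUMBER>".toList else []) ++ c :: gmid cs false

-- middle form of B: emit the placeholder at the START of a digit run (prev = was previous char a digit)
def bmid : List Char → Bool → List Char
  | [], _ => []
  | c :: cs, p =>
    if PySem.Chars.isdigit c then (if p then [] else "<NUMBER>".toList) ++ bmid cs true
    else c :: bmid cs false

lemma a_side : ∀ (cs : List Char) (acc : List (List Char)) (flag : Bool),
    (if (cs.foldl fixLoop (acc, flag)).2
       then (cs.foldl fixLoop (acc, flag)).1 ++ ["<NUMBER>".toList]
       else (cs.foldl fixLoop (acc, flag)).1).flatten
    = acc.flatten ++ gmid cs flag := by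
  intro cs
  induction cs with
  | nil =>
    intro acc flag
    cases flag <;> simp [gmid]
  | cons c cs ih =>
    intro acc flag
    by_cases h : PySem.Chars.isdigit c
    · simp only [List.foldl_cons, fixLoop, h, if_pos, gmid]
      exact ih acc true
    · simp only [List.foldl_cons, fixLoop, h, gmid, if_false, Bool.false_eq_true]
      cases flag <;> rw [ih] <;> simp

-- A's end-of-run placeholder equals B's start-of-run placeholder
lemma gmid_eq_bmid : ∀ (cs : List Char) (flag : Bool),
    gmid cs flag = (if flag then "<NUMBER>".toList else []) ++ bmid cs flag := by
  intro cs
  induction cs with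
  | nil => intro flag; cases flag <;> simp [gmid, bmid]
  | cons c cs ih =>
    intro flag
    by_cases h : PySem.Chars.isdigit c
    · simp only [gmid, bmid, h, if_pos]
      rw [ih true]
      cases flag <;> simp
    · simp only [gmid, bmid, h, if_false, Bool.false_eq_true]
      rw [ih false]
      cases flag <;> simp

lemma single_ne_placeholder (c : Char) : [c] ≠ "<NUMBER>".toList := by
  intro h
  have := congrArg List.length h
  simp at this

lemma fnMapped_cons (c : Char) (cs : List Char) :
    fnMapped (c :: cs) = (if PySem.Chars.isdigit c then "<NUMBER>".toList else [c]) :: fnMapped cs := rfl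

-- B's zip-filter-join equals bmid, generalized over the predecessor piece o
lemma b_side : ∀ (cs : List Char) (o : Option (List Char)),
    ((List.zip (o :: (fnMapped cs).map some) (fnMapped cs)).filterMap
      (fun pc => if pc.2 = "<NUMBER>".toList ∧ pc.1 = some ("<NUMBER>".toList)
                 then none else some pc.2)).flatten
    = bmid cs (decide (o = some ("<NUMBER>".toList))) := by
  intro cs
  induction cs with
  | nil => intro o; simp [fnMapped, bmid]
  | cons c cs ih =>
    intro o
    by_cases h : PySem.Chars.isdigit c
    · rw [fnMapped_cons]
      simp only [h, if_pos, List.map_cons, List.zip_cons_cons, List.filterMap_cons, bmid]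
      by_cases ho : o = some ("<NUMBER>".toList)
      · simp only [ho, and_self, if_pos, decide_eq_true_eq]
        rw [ih (some ("<NUMBER>".toList))]
        simp
      · simp only [ho, and_false, if_false, List.flatten_cons]
        rw [ih (some ("<NUMBER>".toList))]
        simp
    · rw [fnMapped_cons]
      simp only [h, if_false, Bool.false_eq_true, List.map_cons, List.zip_cons_cons,
        List.filterMap_cons, bmid]
      have hc : ¬ ([c] = "<NUMBER>".toList ∧ o = some ("<NUMBER>".toList)) := by
        intro hh; exact single_ne_placeholder c hh.1
      simp only [hc, if_false, List.flatten_cons]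
      rw [ih (some [c])]
      simp

-- ===== VERDICT (by name: the statement is the Claim_ definition above) =====
theorem fix_numbers_spec : Claim_equal_fix_numbers := by
  intro token _
  show String.ofList
      (if (token.toList.foldl fixLoop ([], false)).2
         then (token.toList.foldl fixLoop ([], false)).1 ++ ["<NUMBER>".toList]
         else (token.toList.foldl fixLoop ([], false)).1).flatten
    = String.ofList (((List.zip ((none : Option (List Char)) :: (fnMapped token.toList).map some)
        (fnMapped token.toList)).filterMap
      (fun pc => if pc.2 = "<NUMBER>".toList ∧ pc.1 = some ("<NUMBER>".toList)
                 then none else some pc.2)).flatten)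
  rw [a_side token.toList [] false, gmid_eq_bmid, b_side token.toList none]
  simp
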